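-- pv_equiv track=rewrite | github.com/LogXpert/vocabLog | code/vocabLog.py | mergeTemplates
-- ===== SOURCE A (Python) =====
-- from typing import cast, Collection, IO, Iterable, List, MutableMapping, MutableSequence, Optional, Sequence, Tuple, \
--     TYPE_CHECKING, TypeVar, Union
--
-- def mergeTemplates(existingTemplateStr: str, newTemplateStr: str) -> Tuple[bool, str]:
--     """
--     Merge two templates if they can be combined.
--     :param existingTemplateStr: The existing template string.
--     :param newTemplateStr: The new template string to merge.
--     :return: Tuple indicating if merge happened and the merged template string.
--     """
--     # Check if the new template can be merged with the existing one
--     oldTokens = existingTemplateStr.split()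
--     newTokens = newTemplateStr.split()
--     if len(oldTokens) != len(newTokens):
--         return False, newTemplateStr
--     # Check if the tokens match or can be merged
--     mergedTokens = []
--     for oldToken, newToken in zip(oldTokens, newTokens):
--         if oldToken == newToken:
--             mergedTokens.append(oldToken)
--         elif oldToken == "<*>" or newToken == "<*>":
--             mergedTokens.append("<*>")  # Use wildcard if either token is a wildcard
--         else:
--             return False, newTemplateStr  # If tokens differ and are not wildcards, cannot merge
--     return True, " ".join(mergedTokens)
-- ===== SOURCE B (Python) =====
-- def mergeTemplates(existingTemplateStr: str, newTemplateStr: str):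
--     """Index-based merge: find the positions where the templates differ, check each
--     such position has a wildcard, then patch a copy of the old tokens at exactly
--     those positions."""
--     oldTokens = existingTemplateStr.split()
--     newTokens = newTemplateStr.split()
--     if len(oldTokens) != len(newTokens):
--         return False, newTemplateStr
--     diffPositions = [i for i in range(len(oldTokens)) if oldTokens[i] != newTokens[i]]
--     if any(oldTokens[i] != "<*>" and newTokens[i] != "<*>" for i in diffPositions):
--         return False, newTemplateStr
--     mergedTokens = list(oldTokens)
--     for i in diffPositions:
--         mergedTokens[i] = "<*>"
--     return True, " ".join(mergedTokens)
-- ===== Notes on version B (the rewrite author's own statement) =====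
-- stated objective: alternative
-- what changed: A walks the zipped token pairs in one fused loop that accumulates merged tokens and returns early on a bad pair; B is index-based: it computes the list of positions where the two templates differ, rejects if any differing position lacks a wildcard, and otherwise patches a copy of the old token list to '<*>' at exactly those positions.
import Mathlib
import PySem

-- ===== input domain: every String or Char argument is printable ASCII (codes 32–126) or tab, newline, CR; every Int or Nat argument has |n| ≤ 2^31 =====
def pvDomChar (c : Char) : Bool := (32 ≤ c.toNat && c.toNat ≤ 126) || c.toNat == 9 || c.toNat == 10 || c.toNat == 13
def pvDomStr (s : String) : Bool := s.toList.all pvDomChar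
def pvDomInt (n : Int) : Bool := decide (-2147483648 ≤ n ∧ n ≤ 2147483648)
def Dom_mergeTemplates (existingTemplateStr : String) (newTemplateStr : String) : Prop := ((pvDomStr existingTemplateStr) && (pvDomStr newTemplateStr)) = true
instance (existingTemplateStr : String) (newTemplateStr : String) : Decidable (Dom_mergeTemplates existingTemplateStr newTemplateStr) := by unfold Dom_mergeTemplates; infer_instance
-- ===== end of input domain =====

-- B replaces A's fused pairwise loop by an index-based plan: it lists the positions where
-- the templates differ, rejects if one lacks a wildcard, else patches a copy of the old
-- tokens at exactly those positions; same O(n) cost (objective: alternative).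

-- ===== PORT A =====
-- A's fused loop: builds mergedTokens via an accumulator, aborting (none) on an unmergeable pair.
def mergeLoopA : List (String × String) → List String → Option (List String)
  | [], acc => some acc.reverse
  | (o, n) :: rest, acc =>
    if o = n then mergeLoopA rest (o :: acc)
    else if o = "<*>" ∨ n = "<*>" then mergeLoopA rest ("<*>" :: acc)
    else none

def mergeTemplates (existingTemplateStr : String) (newTemplateStr : String) : Bool × String :=
  let oldTokens := PySem.Str.split₀ existingTemplateStr
  let newTokens := PySem.Str.split₀ newTemplateStr
  if oldTokens.length ≠ newTokens.length then (false, newTemplateStr)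
  else
    match mergeLoopA (oldTokens.zip newTokens) [] with
    | none => (false, newTemplateStr)
    | some mergedTokens => (true, PySem.Str.join " " mergedTokens)

-- ===== PORT B =====
-- Source B's oldTokens[i] / newTokens[i] is always indexed with i < length (i comes from
-- range(len(oldTokens)) and the lengths are equal), so `getD i ""` is exact here.
def mergeTemplates_alt (existingTemplateStr : String) (newTemplateStr : String) : Bool × String :=
  let oldTokens := PySem.Str.split₀ existingTemplateStr
  let newTokens := PySem.Str.split₀ newTemplateStr
  if oldTokens.length ≠ newTokens.length then (false, newTemplateStr)
  else
    let diffPositions := (List.range oldTokens.length).filter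
      (fun i => oldTokens.getD i "" != newTokens.getD i "")
    if diffPositions.any (fun i => (oldTokens.getD i "" != "<*>") && (newTokens.getD i "" != "<*>")) then
      (false, newTemplateStr)
    else
      let mergedTokens := diffPositions.foldl (fun m i => m.set i "<*>") oldTokens
      (true, PySem.Str.join " " mergedTokens)

-- ===== PRECONDITION & SPEC =====
def Spec_mergeTemplates (existingTemplateStr : String) (newTemplateStr : String) (out : Bool × String) : Prop := out = mergeTemplates_alt existingTemplateStr newTemplateStr
instance (existingTemplateStr : String) (newTemplateStr : String) (out : Bool × String) : Decidable (Spec_mergeTemplates existingTemplateStr newTemplateStr out) := by unfold Spec_mergeTemplates; infer_instance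

-- ===== CLAIM (what is proved, stated in full; the proofs are below) =====
def Claim_equal_mergeTemplates : Prop := ∀ (existingTemplateStr : String) (newTemplateStr : String), Dom_mergeTemplates existingTemplateStr newTemplateStr → Spec_mergeTemplates existingTemplateStr newTemplateStr (mergeTemplates existingTemplateStr newTemplateStr)

-- ===== LEMMAS AND PROOFS =====
-- A's loop = (validate, then map) — characterisation of the fused loop.
theorem mergeLoopA_eq (ps : List (String × String)) (acc : List String) :
    mergeLoopA ps acc =
      if ps.all (fun p => p.1 == p.2 || p.1 == "<*>" || p.2 == "<*>") then
        some (acc.reverse ++ ps.map (fun p => if p.1 = p.2 then p.1 else "<*>"))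
      else none := by
  induction ps generalizing acc with
  | nil => simp [mergeLoopA]
  | cons hd tl ih =>
    obtain ⟨o, n⟩ := hd
    by_cases hc : (o == n || o == "<*>" || n == "<*>") = true
    · have hstep : mergeLoopA ((o, n) :: tl) acc
          = mergeLoopA tl ((if o = n then o else "<*>") :: acc) := by
        by_cases h1 : o = n
        · simp [mergeLoopA, h1]
        · have h2 : o = "<*>" ∨ n = "<*>" := by
            simp [h1] at hc
            rcases hc with h | h <;> simp [h]
          simp [mergeLoopA, h1, h2]
      rw [hstep, ih, List.all_cons, hc]
      simp only [Bool.true_and]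
      by_cases hall : (tl.all fun p => p.1 == p.2 || p.1 == "<*>" || p.2 == "<*>") = true
      · simp [hall]
      · simp [hall]
    · have h1 : ¬ o = n := by intro h; exact hc (by simp [h])
      have h2 : ¬ (o = "<*>" ∨ n = "<*>") := by
        intro h; exact hc (by rcases h with h | h <;> simp [h])
      simp [mergeLoopA, h1, h2, List.all_cons, hc]

theorem fold_set_getElem? (ds : List Nat) (m : List String) (j : Nat) :
    ((ds.foldl (fun m i => m.set i "<*>") m))[j]? =
      if j ∈ ds ∧ j < m.length then some "<*>" else m[j]? := by
  induction ds generalizing m with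
  | nil => simp
  | cons d ds ih =>
    simp only [List.foldl_cons, ih, List.length_set, List.getElem?_set, List.mem_cons]
    by_cases hd : d = j <;> by_cases hj : j < m.length <;> by_cases hds : j ∈ ds <;>
      simp_all <;> omega

theorem cond_eq (old new : List String) (h : old.length = new.length) :
    (((List.range old.length).filter
        (fun i => old.getD i "" != new.getD i "")).any
      (fun i => (old.getD i "" != "<*>") && (new.getD i "" != "<*>")))
      = !((old.zip new).all (fun p => p.1 == p.2 || p.1 == "<*>" || p.2 == "<*>")) := by
  rw [Bool.eq_iff_iff]
  simp only [List.any_eq_true, List.mem_filter, List.mem_range, Bool.not_eq_true',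
    List.all_eq_false, bne_iff_ne, ne_eq, Bool.and_eq_true, Bool.or_eq_true, beq_iff_eq,
    not_or]
  constructor
  · rintro ⟨i, ⟨hi, hdiff⟩, hbad⟩
    have hiz : i < (old.zip new).length := by simp [List.length_zip]; omega
    refine ⟨(old.zip new)[i], List.getElem_mem hiz, ?_⟩
    have hg : (old.zip new)[i] = (old[i], new[i]'(by omega)) := List.getElem_zip
    rw [List.getD_eq_getElem old "" hi, List.getD_eq_getElem new "" (by omega)] at hdiff hbad
    simp [hg, hdiff, hbad.1, hbad.2]
  · rintro ⟨p, hp, hbad⟩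
    obtain ⟨i, hiz, hpi⟩ := List.mem_iff_getElem.mp hp
    have hi : i < old.length := by simp [List.length_zip] at hiz; omega
    have hg : (old.zip new)[i] = (old[i], new[i]'(by omega)) := List.getElem_zip
    rw [hg] at hpi
    refine ⟨i, ⟨hi, ?_⟩, ?_⟩ <;>
      rw [List.getD_eq_getElem old "" hi, List.getD_eq_getElem new "" (by omega)] <;>
      · subst hpi; simp at hbad ⊢; tauto

theorem patch_eq (old new : List String) (h : old.length = new.length) :
    ((List.range old.length).filter
        (fun i => old.getD i "" != new.getD i "")).foldl (fun m i => m.set i "<*>") old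
      = (old.zip new).map (fun p => if p.1 = p.2 then p.1 else "<*>") := by
  apply List.ext_getElem?
  intro j
  rw [fold_set_getElem?]
  by_cases hj : j < old.length
  · have hjm : j < ((old.zip new).map (fun p => if p.1 = p.2 then p.1 else "<*>")).length := by
      simp [List.length_zip]; omega
    rw [List.getElem?_eq_getElem (by omega : j < old.length),
        List.getElem?_eq_getElem hjm]
    simp only [List.getElem_map]
    have hg : (old.zip new)[j]'(by simp [List.length_zip]; omega)
        = (old[j], new[j]'(by omega)) := List.getElem_zip
    rw [hg]
    simp only [List.mem_filter, List.mem_range, bne_iff_ne, ne_eq]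
    rw [List.getD_eq_getElem old "" hj, List.getD_eq_getElem new "" (by omega)]
    by_cases hdiff : old[j] = new[j]'(by omega)
    · simp [hdiff, hj]
    · simp [hdiff, hj]
  · rw [List.getElem?_eq_none (by omega : old.length ≤ j),
        List.getElem?_eq_none (by simp [List.length_zip]; omega)]
    simp [hj]

-- The two decompositions agree on any pair of token lists.
theorem core_eq (old new : List String) (s : String) :
    (if old.length ≠ new.length then (false, s)
     else match mergeLoopA (old.zip new) [] with
          | none => (false, s)
          | some m => (true, PySem.Str.join " " m))
    = (if old.length ≠ new.length then (false, s)
       else if ((List.range old.length).filter (fun i => old.getD i "" != new.getD i "")).any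
              (fun i => (old.getD i "" != "<*>") && (new.getD i "" != "<*>")) then (false, s)
       else (true, PySem.Str.join " "
              (((List.range old.length).filter (fun i => old.getD i "" != new.getD i "")).foldl
                (fun m i => m.set i "<*>") old))) := by
  by_cases hlen : old.length = new.length
  · rw [if_neg (by simp [hlen]), if_neg (by simp [hlen]),
      mergeLoopA_eq, cond_eq _ _ hlen, patch_eq _ _ hlen]
    by_cases hall : ((old.zip new).all
        (fun p => p.1 == p.2 || p.1 == "<*>" || p.2 == "<*>")) = true
    · simp [hall]
    · simp [hall]
  · simp [hlen]

-- ===== VERDICT (by name: the statement is the Claim_ definition above) =====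
theorem mergeTemplates_spec : Claim_equal_mergeTemplates := by
  intro e n _
  exact core_eq (PySem.Str.split₀ e) (PySem.Str.split₀ n) n
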